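-- pv_equiv track=rewrite | github.com/VoropaevIvan/EGE | Шаблоны/№ 15/flesh.py | check
-- ===== SOURCE A (Python) =====
-- def check(l, r):
--     for x in range(0, 300*3):
--         a = l <= x <= r
--         p = (9 * 3) <= x <= (19 * 3)
--         q = (24 * 3) <= x <= (290 * 3)
--         f = a <= (p or q)
--         if f != f_usl:
--             return 0
--     return 1
--
-- f_usl = 1
-- ===== SOURCE B (Python) =====
-- def check(l, r):
--     # Closed-form interval check: the scanned domain is [0, 899]; the formula
--     # holds everywhere iff the clamped interval [lo, hi] is empty or lies
--     # entirely inside one of the allowed blocks [27, 57] or [72, 870].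
--     lo = max(l, 0)
--     hi = min(r, 899)
--     if lo > hi:
--         return 1
--     if (27 <= lo and hi <= 57) or (72 <= lo and hi <= 870):
--         return 1
--     return 0
-- ===== Notes on version B (the rewrite author's own statement) =====
-- stated objective: faster
-- what changed: Replaced the 900-iteration scan with closed-form interval arithmetic: clamp [l,r] to [0,899] and test emptiness or containment in one of the two allowed blocks [27,57], [72,870].
import Mathlib
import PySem

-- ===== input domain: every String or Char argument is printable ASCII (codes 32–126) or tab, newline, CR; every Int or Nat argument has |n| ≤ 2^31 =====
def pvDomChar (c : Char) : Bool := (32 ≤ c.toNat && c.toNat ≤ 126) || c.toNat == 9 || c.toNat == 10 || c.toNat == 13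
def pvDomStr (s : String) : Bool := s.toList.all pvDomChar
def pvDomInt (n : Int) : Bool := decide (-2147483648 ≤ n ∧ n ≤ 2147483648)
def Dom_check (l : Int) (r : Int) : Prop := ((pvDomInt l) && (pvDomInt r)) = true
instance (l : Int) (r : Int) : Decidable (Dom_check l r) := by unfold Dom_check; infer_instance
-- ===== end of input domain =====

-- B replaces A's 900-step scan with O(1) closed-form interval containment.

-- ===== PORT A =====
def f_usl : Int := 1

-- the loop body of A over the remaining range values; early return 0 on a failing x
def checkLoop (l : Int) (r : Int) : List Int → Int
  | [] => 1
  | x :: xs =>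
    let a : Bool := decide (l ≤ x ∧ x ≤ r)
    let p : Bool := decide ((9 * 3 : Int) ≤ x ∧ x ≤ 19 * 3)
    let q : Bool := decide ((24 * 3 : Int) ≤ x ∧ x ≤ 290 * 3)
    let f : Bool := a ≤ (p || q)
    if (if f then (1 : Int) else 0) ≠ f_usl then 0
    else checkLoop l r xs

def check (l : Int) (r : Int) : Int :=
  checkLoop l r (PySem.List.pyRange 0 (300 * 3) 1)

-- ===== PORT B =====
def check_alt (l : Int) (r : Int) : Int :=
  let lo := max l 0
  let hi := min r 899
  if lo > hi then 1
  else if (27 ≤ lo ∧ hi ≤ 57) ∨ (72 ≤ lo ∧ hi ≤ 870) then 1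
  else 0

-- ===== PRECONDITION & SPEC =====
def Spec_check (l : Int) (r : Int) (out : Int) : Prop := out = check_alt l r
instance (l : Int) (r : Int) (out : Int) : Decidable (Spec_check l r out) := by unfold Spec_check; infer_instance

-- ===== CLAIM (what is proved, stated in full; the proofs are below) =====
def Claim_equal_check : Prop := ∀ (l : Int) (r : Int), Dom_check l r → Spec_check l r (check l r)

-- ===== LEMMAS AND PROOFS =====

abbrev goodX (l r x : Int) : Prop := l ≤ x ∧ x ≤ r → (27 ≤ x ∧ x ≤ 57) ∨ (72 ≤ x ∧ x ≤ 870)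

theorem checkLoop_eq (l r : Int) (xs : List Int) :
    checkLoop l r xs = if ∀ x ∈ xs, goodX l r x then 1 else 0 := by
  induction xs with
  | nil => simp [checkLoop]
  | cons x xs ih =>
    have hf : decide ((decide (l ≤ x ∧ x ≤ r) : Bool) ≤
        (decide ((9 * 3 : Int) ≤ x ∧ x ≤ 19 * 3) || decide ((24 * 3 : Int) ≤ x ∧ x ≤ 290 * 3)))
        = decide (goodX l r x) := by
      rw [decide_eq_decide]
      simp [Bool.le_iff_imp]
    simp only [checkLoop, f_usl, hf]
    rw [ih]
    simp only [List.forall_mem_cons]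
    by_cases hg : goodX l r x
    · simp only [decide_eq_true hg]
      norm_num
      split_ifs <;> tauto
    · simp only [decide_eq_false hg]
      norm_num
      exact fun hgood => absurd (fun ha => hgood ha.1 ha.2) hg

theorem all_range_iff (l r : Int) :
    (∀ x ∈ PySem.List.pyRange 0 (300 * 3) 1, goodX l r x) ↔
    (∀ x : Int, 0 ≤ x → x < 900 → goodX l r x) := by
  constructor
  · intro h x h0 h1
    exact h x (by rw [PySem.List.mem_pyRange_one]; constructor <;> omega)
  · intro h x hx
    rw [PySem.List.mem_pyRange_one] at hx
    exact h x hx.1 (by omega)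

-- ===== VERDICT (by name: the statement is the Claim_ definition above) =====
theorem check_spec : Claim_equal_check := by
  intro l r _
  unfold Spec_check check check_alt
  rw [checkLoop_eq, if_congr (all_range_iff l r) rfl rfl]
  by_cases h : ∀ x : Int, 0 ≤ x → x < 900 → goodX l r x
  · rw [if_pos h]
    show (1 : Int) = if max l 0 > min r 899 then 1
      else if (27 ≤ max l 0 ∧ min r 899 ≤ 57) ∨ (72 ≤ max l 0 ∧ min r 899 ≤ 870) then 1 else 0
    by_cases he : max l 0 > min r 899
    · rw [if_pos he]
    · have hglo := h (max l 0) (by omega) (by omega)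
      have hghi := h (min r 899) (by omega) (by omega)
      have hg58 := h 58 (by omega) (by omega)
      simp only [goodX] at hglo hghi hg58
      rw [if_neg he, if_pos (by omega)]
  · rw [if_neg h]
    push Not at h
    obtain ⟨x, h0, h1, hx⟩ := h
    show (0 : Int) = if max l 0 > min r 899 then 1
      else if (27 ≤ max l 0 ∧ min r 899 ≤ 57) ∨ (72 ≤ max l 0 ∧ min r 899 ≤ 870) then 1 else 0
    rw [if_neg (by omega), if_neg (by omega)]
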